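-- pv_equiv track=rewrite | github.com/isantop/kernelstub | kernelstub/mbapplication.py | replace_dict_keys
-- ===== SOURCE A (Python) =====
-- def replace_dict_keys(data):
--     """ Replaces verbose keys in data with human-friendly ones."""
--     keys = {
--         'index': 'Index',
--         'entry_id': 'ID',
--         'title': 'Title',
--         'root_partition': 'Root Node',
--         'mount_point': 'Mount Point',
--         'exec_path': 'Loader',
--         'options': 'Kernel Options',
--     }
--
--     for key in keys:
--         data = data.replace(key, keys[key])
--
--     return data
-- ===== SOURCE B (Python) =====
-- def replace_dict_keys(data):
--     """ Replaces verbose keys in data with human-friendly ones."""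
--     keys = {
--         'index': 'Index',
--         'entry_id': 'ID',
--         'title': 'Title',
--         'root_partition': 'Root Node',
--         'mount_point': 'Mount Point',
--         'exec_path': 'Loader',
--         'options': 'Kernel Options',
--     }
--
--     out = []
--     i = 0
--     while i < len(data):
--         for key, name in keys.items():
--             if data.startswith(key, i):
--                 out.append(name)
--                 i += len(key)
--                 break
--         else:
--             out.append(data[i])
--             i += 1
--     return ''.join(out)
-- ===== Notes on version B (the rewrite author's own statement) =====
-- stated objective: alternative
-- what changed: B makes one left-to-right scan of the string, at each position emitting the friendly name of the key that starts there (or the character) in a single pass, instead of A's seven sequential full-string replace passes; Pre_ excludes strings containing one of five junction substrings where key occurrences overlap or chain together, on which A's dict-ordered passes and B's leftmost-first pass defensibly pick different matches.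
-- outside the precondition, e.g. on replace_dict_keys('indexec_path'): A returns 'IndLoader', B returns 'Indexec_path'; on replace_dict_keys('mount_pointitle'): A returns 'mount_poinTitle', B returns 'Mount Pointitle'; on replace_dict_keys('titlentry_id'): A returns 'titlID', B returns 'Titlentry_id'
import Mathlib
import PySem

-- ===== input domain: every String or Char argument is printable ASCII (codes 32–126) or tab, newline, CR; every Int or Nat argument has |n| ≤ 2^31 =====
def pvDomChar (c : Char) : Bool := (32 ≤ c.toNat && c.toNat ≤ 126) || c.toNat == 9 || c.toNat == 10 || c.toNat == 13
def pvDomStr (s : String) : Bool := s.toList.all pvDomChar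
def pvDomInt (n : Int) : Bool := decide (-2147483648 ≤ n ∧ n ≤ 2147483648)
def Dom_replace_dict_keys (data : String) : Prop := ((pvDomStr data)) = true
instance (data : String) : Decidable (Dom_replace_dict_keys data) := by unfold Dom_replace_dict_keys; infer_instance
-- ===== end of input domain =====

-- B replaces A's seven sequential full-string replace passes by ONE left-to-right scan that,
-- at each position, emits the friendly name of the key starting there (or the character); an
-- alternative single-pass algorithm of similar cost.

-- ===== PORT A =====
def replace_dict_keys (data : String) : String :=
  let keys : PySem.Dict String String :=
    (((((((PySem.Dict.empty).insert "index" "Index").insert "entry_id" "ID").insert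
        "title" "Title").insert "root_partition" "Root Node").insert
        "mount_point" "Mount Point").insert "exec_path" "Loader").insert
        "options" "Kernel Options"
  keys.keys.foldl (fun d key => PySem.Str.replace d key (keys.getD key "")) data

-- ===== PORT B =====
-- the dict's items, as char lists
def pvKeysC : List (List Char × List Char) :=
  [("index".toList, "Index".toList), ("entry_id".toList, "ID".toList),
   ("title".toList, "Title".toList), ("root_partition".toList, "Root Node".toList),
   ("mount_point".toList, "Mount Point".toList), ("exec_path".toList, "Loader".toList),
   ("options".toList, "Kernel Options".toList)]

-- data.startswith(key, i)  (two-argument startswith, ported by hand; exact on every input)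
def pvStartsWith (data : List Char) (key : List Char) (i : Nat) : Bool :=
  key.isPrefixOf (data.drop i)

-- Source B's while loop; `fuel` only makes the loop total (each iteration advances i by ≥ 1,
-- so fuel = len(data) − i iterations always suffice and the 0 branch is never reached).
-- The for/break/else over the dict items is the first key matching at i: List.find?.
def pvScanGo (data : List Char) (fuel : Nat) (i : Nat) (out : List (List Char)) : List Char :=
  match fuel with
  | 0 => out.flatten
  | fuel + 1 =>
    if h : i < data.length then
      match pvKeysC.find? (fun kv => pvStartsWith data kv.1 i) with
      | some kv => pvScanGo data fuel (i + kv.1.length) (out ++ [kv.2])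
      | none => pvScanGo data fuel (i + 1) (out ++ [[data[i]]])
    else out.flatten

def replace_dict_keys_alt (data : String) : String :=
  String.ofList (pvScanGo data.toList data.toList.length 0 [])

-- ===== PRECONDITION & SPEC =====
-- Pre_ excludes strings containing one of the five junction substrings on which an occurrence
-- of one key overlaps, or chains into, an occurrence of another: there A's seven dict-ordered
-- passes and B's single left-to-right pass defensibly pick different matches, and neither
-- choice is specified.
def pvBad : List String :=
  ["indexec_path", "mount_pointitle", "root_partitionxec_path", "titlentry_id", "titlexec_path"]

def Pre_replace_dict_keys (data : String) : Prop :=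
  ∀ b ∈ pvBad, ¬ (b.toList <:+: data.toList)
instance (data : String) : Decidable (Pre_replace_dict_keys data) := by
  unfold Pre_replace_dict_keys; infer_instance

def pvWitness_replace_dict_keys : String := "title: options"

def Spec_replace_dict_keys (data : String) (out : String) : Prop := out = replace_dict_keys_alt data
instance (data : String) (out : String) : Decidable (Spec_replace_dict_keys data out) := by
  unfold Spec_replace_dict_keys; infer_instance

-- ===== CLAIM (what is proved, stated in full; the proofs are below) =====
def Claim_equal_replace_dict_keys : Prop :=
  ∀ (data : String), Dom_replace_dict_keys data → Pre_replace_dict_keys data →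
    Spec_replace_dict_keys data (replace_dict_keys data)

-- ===== LEMMAS AND PROOFS =====

def pvBadC : List (List Char) := pvBad.map String.toList

-- characters keys are made of (lowercase letters and '_'); every value starts outside it
def pvKeyAlpha (c : Char) : Bool := ('a' ≤ c && c ≤ 'z') || c == '_'
def pvLow (w : List Char) : Bool := w.all pvKeyAlpha

def pvPairOK (kv : List Char × List Char) : Prop :=
  kv.1 ≠ [] ∧ pvLow kv.1 = true ∧ kv.2 ≠ [] ∧ pvKeyAlpha kv.2.headI = false
def pvPairsOK (ps : List (List Char × List Char)) : Prop := ∀ kv ∈ ps, pvPairOK kv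

-- proof-side model of one Python str.replace pass (leftmost, non-overlapping)
def pvRep (k v l : List Char) : List Char :=
  if hl : l = [] then []
  else if hk : k ≠ [] ∧ k.isPrefixOf l then v ++ pvRep k v (l.drop k.length)
  else l.headI :: pvRep k v (l.drop 1)
termination_by l.length
decreasing_by
  · have h1 : k.length ≠ 0 := by simpa [List.length_eq_zero_iff] using hk.1
    have h2 : l.length ≠ 0 := by simpa [List.length_eq_zero_iff] using hl
    simp only [List.length_drop]; omega
  · have h2 : l.length ≠ 0 := by simpa [List.length_eq_zero_iff] using hl
    simp only [List.length_drop]; omega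

theorem pvRep_nil (k v : List Char) : pvRep k v [] = [] := by rw [pvRep]; simp

theorem pvRep_pos (k v l : List Char) (hk : k ≠ []) (hl : l ≠ []) (hp : k <+: l) :
    pvRep k v l = v ++ pvRep k v (l.drop k.length) := by
  rw [pvRep, dif_neg hl, dif_pos ⟨hk, by simpa [List.isPrefixOf_iff_prefix] using hp⟩]

theorem pvRep_neg (k v : List Char) (c : Char) (t : List Char) (hp : ¬ k <+: (c :: t)) :
    pvRep k v (c :: t) = c :: pvRep k v t := by
  rw [pvRep, dif_neg (by simp), dif_neg (by
    rintro ⟨-, h⟩; exact hp (List.isPrefixOf_iff_prefix.mp h))]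
  simp

def pvChain (ps : List (List Char × List Char)) (l : List Char) : List Char :=
  ps.foldl (fun s kv => pvRep kv.1 kv.2 s) l

theorem pvChain_cons (k v : List Char) (ps : List (List Char × List Char)) (l : List Char) :
    pvChain ((k, v) :: ps) l = pvChain ps (pvRep k v l) := rfl

theorem pvChain_nil : ∀ ps : List (List Char × List Char), pvChain ps [] = [] := by
  intro ps; induction ps with
  | nil => rfl
  | cons kv ps ih =>
    have h : pvChain (kv :: ps) [] = pvChain ps (pvRep kv.1 kv.2 []) := rfl
    rw [h, pvRep_nil]
    exact ih

theorem pvChain_append (ps qs : List (List Char × List Char)) (l : List Char) :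
    pvChain (ps ++ qs) l = pvChain qs (pvChain ps l) := List.foldl_append

-- A-side bridge: Python's builtin replace equals pvRep (non-empty pattern)
theorem pv_go_eq (k v : List Char) (hk : k ≠ []) :
    ∀ fuel l acc, l.length ≤ fuel →
      PySem.Chars.replace.go k v fuel l acc = acc.reverse ++ pvRep k v l := by
  have hkl : k.length ≠ 0 := by simpa [List.length_eq_zero_iff] using hk
  intro fuel
  induction fuel with
  | zero =>
    intro l acc hl
    have : l = [] := by simpa [List.length_eq_zero_iff] using Nat.le_zero.mp hl
    subst this
    simp [PySem.Chars.replace.go, pvRep_nil]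
  | succ fuel ih =>
    intro l acc hl
    rcases l with _ | ⟨c, t⟩
    · simp [PySem.Chars.replace.go, pvRep_nil]
    by_cases hp : k.isPrefixOf (c :: t)
    · have hstep : PySem.Chars.replace.go k v (fuel + 1) (c :: t) acc
          = PySem.Chars.replace.go k v fuel ((c :: t).drop k.length) (v.reverse ++ acc) := by
        conv_lhs => rw [PySem.Chars.replace.go]
        simp [hp]
      rw [hstep, ih _ _ (by simp only [List.length_drop, List.length_cons]; simp at hl; omega)]
      rw [pvRep_pos k v (c :: t) hk (by simp) (List.isPrefixOf_iff_prefix.mp hp)]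
      simp
    · have hstep : PySem.Chars.replace.go k v (fuel + 1) (c :: t) acc
          = PySem.Chars.replace.go k v fuel t (c :: acc) := by
        conv_lhs => rw [PySem.Chars.replace.go]
        simp [hp]
      rw [hstep, ih _ _ (by simp at hl ⊢; omega)]
      rw [pvRep_neg k v c t (fun hc => hp (List.isPrefixOf_iff_prefix.mpr hc))]
      simp

theorem pv_replace_eq_Rep (s old new : String) (hk : old.toList ≠ []) :
    PySem.Str.replace s old new = String.ofList (pvRep old.toList new.toList s.toList) := by
  apply String.toList_inj.mp
  simp only [PySem.Str.toList_replace, String.toList_ofList]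
  rw [PySem.Chars.replace]
  have hEmp : old.toList.isEmpty = false := by simp [hk]
  rw [hEmp]
  simp only [Bool.false_eq_true, if_false]
  rw [pv_go_eq old.toList new.toList hk s.toList.length s.toList [] le_rfl]
  simp

-- prefix bookkeeping
theorem pv_prefix_short {w a s : List Char} (h : w <+: a ++ s) (hlen : w.length ≤ a.length) :
    w <+: a := by
  obtain ⟨u, hu⟩ := h
  have hw : w = a.take w.length := by
    have h2 := congrArg (List.take w.length) hu
    rwa [List.take_left, List.take_append_of_le_length hlen] at h2
  rw [hw]; exact List.take_prefix _ _

theorem pv_prefix_split {w a s : List Char} (h : w <+: a ++ s) (hlen : a.length ≤ w.length) :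
    a <+: w ∧ w.drop a.length <+: s := by
  obtain ⟨u, hu⟩ := h
  have ha : a = w.take a.length := by
    rw [show w.take a.length = (w ++ u).take a.length from
      (List.take_append_of_le_length hlen).symm, hu, List.take_left]
  constructor
  · rw [ha]; exact List.take_prefix _ _
  · refine ⟨u, ?_⟩
    have hdu := congrArg (List.drop a.length) hu
    rwa [List.drop_append_of_le_length hlen, List.drop_left] at hdu

theorem pvLow_drop (w : List Char) (n : Nat) (h : pvLow w = true) : pvLow (w.drop n) = true := by
  simp only [pvLow, List.all_eq_true] at h ⊢
  exact fun c hc => h c (List.mem_of_mem_drop hc)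

theorem pv_prefix_transfer {w a s r : List Char}
    (hrefl : ∀ x, pvLow x = true → x <+: s → x <+: r)
    (hw : pvLow w = true) (h : w <+: a ++ s) : w <+: a ++ r := by
  by_cases hlen : w.length ≤ a.length
  · exact (pv_prefix_short h hlen).trans (List.prefix_append a r)
  · obtain ⟨h1, h2⟩ := pv_prefix_split h (by omega)
    have h2' := hrefl _ (pvLow_drop _ _ hw) h2
    obtain ⟨u, hu⟩ := h1
    obtain ⟨z, hz⟩ := h2'
    refine ⟨z, ?_⟩
    have hu' : w.drop a.length = u := by rw [← hu, List.drop_left]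
    rw [← hu, List.append_assoc, ← hu', hz]

-- any lowercase-word prefix of a pvRep output was already a prefix of its input
theorem pv_pref_Rep_fuel (k v : List Char) (hv : v ≠ []) (hvh : pvKeyAlpha v.headI = false) :
    ∀ n l, l.length ≤ n → ∀ w, pvLow w = true → w <+: pvRep k v l → w <+: l := by
  intro n
  induction n with
  | zero =>
    intro l hl w hw h
    have : l = [] := by simpa [List.length_eq_zero_iff] using Nat.le_zero.mp hl
    subst this; rw [pvRep_nil] at h; simpa using h
  | succ n ih =>
    intro l hl w hw h
    rcases l with _ | ⟨c, t⟩
    · rw [pvRep_nil] at h; simpa using h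
    by_cases hcond : (k ≠ [] ∧ k.isPrefixOf (c :: t) = true)
    · rw [show pvRep k v (c :: t) = v ++ pvRep k v ((c :: t).drop k.length) from by
        rw [pvRep, dif_neg (by simp), dif_pos hcond]] at h
      rcases w with _ | ⟨wc, wt⟩
      · exact List.nil_prefix
      rcases v with _ | ⟨vh, vt⟩
      · exact absurd rfl hv
      rw [List.cons_append] at h
      obtain ⟨rfl, -⟩ := List.cons_prefix_cons.mp h
      exfalso
      have hwc : pvKeyAlpha wc = true := by
        simp only [pvLow, List.all_cons, Bool.and_eq_true] at hw; exact hw.1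
      rw [show (wc :: vt).headI = wc from rfl] at hvh
      rw [hvh] at hwc; exact Bool.false_ne_true hwc
    · rw [show pvRep k v (c :: t) = c :: pvRep k v t from by
        rw [pvRep, dif_neg (by simp), dif_neg hcond]; simp] at h
      rcases w with _ | ⟨wc, wt⟩
      · exact List.nil_prefix
      obtain ⟨rfl, h'⟩ := List.cons_prefix_cons.mp h
      have hwt : pvLow wt = true := by
        simp only [pvLow, List.all_cons, Bool.and_eq_true] at hw; exact hw.2
      have := ih t (by simp at hl; omega) wt hwt h'
      exact List.cons_prefix_cons.mpr ⟨rfl, this⟩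

theorem pv_pref_Rep (k v : List Char) (hv : v ≠ []) (hvh : pvKeyAlpha v.headI = false)
    (l w : List Char) (hw : pvLow w = true) (h : w <+: pvRep k v l) : w <+: l :=
  pv_pref_Rep_fuel k v hv hvh l.length l le_rfl w hw h

theorem pv_pref_chain : ∀ ps, pvPairsOK ps →
    ∀ l w, pvLow w = true → w <+: pvChain ps l → w <+: l := by
  intro ps
  induction ps with
  | nil => intro _ l w _ h; exact h
  | cons kv ps ih =>
    intro hOK l w hw h
    rw [show pvChain (kv :: ps) l = pvChain ps (pvRep kv.1 kv.2 l) from rfl] at h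
    have h' := ih (fun x hx => hOK x (List.mem_cons_of_mem _ hx)) _ w hw h
    obtain ⟨-, -, hv, hvh⟩ := hOK kv List.mem_cons_self
    exact pv_pref_Rep kv.1 kv.2 hv hvh l w hw h'

-- a replace pass passes over a protected prefix with no pattern start inside it
theorem pv_Rep_split (k v : List Char) :
    ∀ a b, (∀ p < a.length, ¬ k <+: (a ++ b).drop p) → pvRep k v (a ++ b) = a ++ pvRep k v b := by
  intro a
  induction a with
  | nil => intro b _; rfl
  | cons c a' ih =>
    intro b h
    have h0 : ¬ k <+: (c :: (a' ++ b)) := by simpa using h 0 (by simp)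
    rw [List.cons_append, pvRep_neg k v c (a' ++ b) h0,
      ih b (fun p hp hc => h (p + 1) (by simp; omega) (by simpa using hc))]
    simp

theorem pv_chain_protect : ∀ ps (a r : List Char), pvPairsOK ps →
    (∀ kv ∈ ps, ∀ p < a.length, ¬ kv.1 <+: (a ++ r).drop p) →
    ∀ s, (∀ w, pvLow w = true → w <+: s → w <+: r) →
      pvChain ps (a ++ s) = a ++ pvChain ps s := by
  intro ps
  induction ps with
  | nil => intro a r _ _ s _; rfl
  | cons kv ps ih =>
    intro a r hOK H s hrefl
    obtain ⟨hk, hklow, hv, hvh⟩ := hOK kv List.mem_cons_self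
    have hks : ∀ p < a.length, ¬ kv.1 <+: (a ++ s).drop p := by
      intro p hp hc
      rw [List.drop_append_of_le_length (le_of_lt hp)] at hc
      have := pv_prefix_transfer hrefl hklow hc
      exact H kv List.mem_cons_self p hp
        (by rwa [List.drop_append_of_le_length (le_of_lt hp)])
    rw [pvChain_cons, pvChain_cons, pv_Rep_split kv.1 kv.2 a s hks]
    exact ih a r (fun x hx => hOK x (List.mem_cons_of_mem _ hx))
      (fun x hx => H x (List.mem_cons_of_mem _ hx)) (pvRep kv.1 kv.2 s)
      (fun w hw h => hrefl w hw (pv_pref_Rep kv.1 kv.2 hv hvh s w hw h))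

-- NoBad + the two static facts about a pair of words give the protection hypothesis
theorem pv_protectd (a kj pref r : List Char)
    (hNB : ∀ b ∈ pvBadC, ¬ b <:+: (pref ++ r))
    (h1 : ∀ p < a.length, ¬ kj <+: a.drop p)
    (h2 : ∀ p < a.length, a.drop p <+: kj → (pref ++ kj.drop (a.length - p)) ∈ pvBadC) :
    ∀ p < a.length, ¬ kj <+: (a ++ r).drop p := by
  intro p hp hc
  rw [List.drop_append_of_le_length (le_of_lt hp)] at hc
  by_cases hlen : kj.length ≤ a.length - p
  · exact h1 p hp (pv_prefix_short hc (by simp only [List.length_drop]; omega))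
  · obtain ⟨hpre, hdrop⟩ := pv_prefix_split hc (by simp only [List.length_drop]; omega)
    rw [List.length_drop] at hdrop
    apply hNB _ (h2 p hp hpre)
    apply List.IsPrefix.isInfix
    obtain ⟨u, hu⟩ := hdrop
    exact ⟨u, by rw [List.append_assoc, hu]⟩

theorem pv_cons_commute : ∀ ps, pvPairsOK ps → ∀ (c : Char) (t : List Char),
    (∀ kv ∈ ps, ¬ kv.1 <+: (c :: t)) → pvChain ps (c :: t) = c :: pvChain ps t := by
  intro ps
  induction ps with
  | nil => intro _ c t _; rfl
  | cons kv ps ih =>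
    intro hOK c t H
    obtain ⟨hk, hklow, hv, hvh⟩ := hOK kv List.mem_cons_self
    have h0 := H kv List.mem_cons_self
    rw [pvChain_cons, pvChain_cons, pvRep_neg kv.1 kv.2 c t h0]
    rw [ih (fun x hx => hOK x (List.mem_cons_of_mem _ hx)) c (pvRep kv.1 kv.2 t) ?_]
    intro x hx hc
    have hxOK := hOK x (List.mem_cons_of_mem _ hx)
    have : x.1 <+: pvRep kv.1 kv.2 (c :: t) := by rw [pvRep_neg kv.1 kv.2 c t h0]; exact hc
    exact H x (List.mem_cons_of_mem _ hx)
      (pv_pref_Rep kv.1 kv.2 hv hvh (c :: t) x.1 hxOK.2.1 this)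

theorem pv_chain_step (pre post : List (List Char × List Char)) (ki vi r : List Char)
    (hOK : pvPairsOK (pre ++ (ki, vi) :: post))
    (Hpre : ∀ kv ∈ pre, ∀ p < ki.length, ¬ kv.1 <+: (ki ++ r).drop p)
    (Hpost : ∀ kv ∈ post, ∀ p < vi.length, ¬ kv.1 <+: (vi ++ r).drop p) :
    pvChain (pre ++ (ki, vi) :: post) (ki ++ r) = vi ++ pvChain (pre ++ (ki, vi) :: post) r := by
  have hOKpre : pvPairsOK pre := fun x hx => hOK x (List.mem_append_left _ hx)
  have hOKpost : pvPairsOK post := fun x hx =>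
    hOK x (List.mem_append_right _ (List.mem_cons_of_mem _ hx))
  obtain ⟨hki, hkilow, hvi, hvih⟩ := hOK (ki, vi) (List.mem_append_right _ List.mem_cons_self)
  have h1 : pvChain pre (ki ++ r) = ki ++ pvChain pre r :=
    pv_chain_protect pre ki r hOKpre Hpre r (fun _ _ h => h)
  have hrefl : ∀ w, pvLow w = true → w <+: pvChain pre r → w <+: r :=
    fun w hw h => pv_pref_chain pre hOKpre r w hw h
  have h2 : pvRep ki vi (ki ++ pvChain pre r) = vi ++ pvRep ki vi (pvChain pre r) := by
    rw [pvRep_pos ki vi _ hki (by simp [hki]) (List.prefix_append ki _), List.drop_left]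
  have hrefl2 : ∀ w, pvLow w = true → w <+: pvRep ki vi (pvChain pre r) → w <+: r :=
    fun w hw h => hrefl w hw (pv_pref_Rep ki vi hvi hvih _ w hw h)
  have h3 : pvChain post (vi ++ pvRep ki vi (pvChain pre r))
      = vi ++ pvChain post (pvRep ki vi (pvChain pre r)) :=
    pv_chain_protect post vi r hOKpost Hpost _ hrefl2
  rw [pvChain_append, h1, pvChain_cons, h2, h3, pvChain_append, pvChain_cons]

-- clean single-pass model of B
def pvScanF : Nat → List Char → List Char
  | 0, _ => []
  | _ + 1, [] => []
  | fuel + 1, c :: t =>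
    match pvKeysC.find? (fun kv => kv.1.isPrefixOf (c :: t)) with
    | some kv => kv.2 ++ pvScanF fuel ((c :: t).drop kv.1.length)
    | none => c :: pvScanF fuel t

theorem pvKeysC_OK : pvPairsOK pvKeysC := by
  intro kv hkv
  simp only [pvKeysC, List.mem_cons, List.not_mem_nil, or_false] at hkv
  rcases hkv with rfl | rfl | rfl | rfl | rfl | rfl | rfl <;>
    exact ⟨by decide, by decide, by decide, by decide⟩

-- ===== the heart: chained replaces = single pass, away from the junction substrings =====
theorem pv_main : ∀ fuel l, l.length ≤ fuel → (∀ b ∈ pvBadC, ¬ b <:+: l) →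
    pvChain pvKeysC l = pvScanF fuel l := by
  intro fuel
  induction fuel with
  | zero =>
    intro l hl _
    have : l = [] := by simpa [List.length_eq_zero_iff] using Nat.le_zero.mp hl
    subst this; rw [pvChain_nil]; rfl
  | succ fuel ih =>
    intro l hl hNB
    rcases l with _ | ⟨c, t⟩
    · rw [pvChain_nil]; rfl
    cases hf : pvKeysC.find? (fun kv => kv.1.isPrefixOf (c :: t)) with
    | none =>
      have hnp : ∀ kv ∈ pvKeysC, ¬ kv.1 <+: (c :: t) := by
        intro kv hkv hc
        have := List.find?_eq_none.mp hf kv hkv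
        simp only [List.isPrefixOf_iff_prefix] at this
        exact this hc
      rw [pv_cons_commute pvKeysC pvKeysC_OK c t hnp]
      rw [ih t (by simp at hl; omega) (fun b hb hc =>
        hNB b hb (hc.trans (List.suffix_cons c t).isInfix))]
      simp [pvScanF, hf]
    | some kv =>
      have hmem := List.mem_of_find?_eq_some hf
      have hpre : kv.1 <+: (c :: t) := by
        have := List.find?_some hf
        simpa [List.isPrefixOf_iff_prefix] using this
      obtain ⟨r, hr⟩ := hpre
      have hscan : pvScanF (fuel + 1) (c :: t) = kv.2 ++ pvScanF fuel r := by
        have hdrop : (c :: t).drop kv.1.length = r := by rw [← hr, List.drop_left]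
        simp [pvScanF, hf, hdrop]
      have hNBl : ∀ b ∈ pvBadC, ¬ b <:+: (kv.1 ++ r) := by rw [hr]; exact hNB
      have hNBr : ∀ b ∈ pvBadC, ¬ b <:+: r := fun b hb hc =>
        hNB b hb (by rw [← hr]; exact hc.trans (show r <:+ kv.1 ++ r from ⟨kv.1, rfl⟩).isInfix)
      have hrlen : r.length ≤ fuel := by
        have := congrArg List.length hr
        have hk1 := pvKeysC_OK kv hmem
        have : kv.1.length + r.length = t.length + 1 := by simpa using this
        have hk1' : kv.1.length ≠ 0 := by
          simpa [List.length_eq_zero_iff] using hk1.1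
        simp at hl; omega
      have hIH : pvChain pvKeysC r = pvScanF fuel r := ih r hrlen hNBr
      rw [hscan, ← hr, ← hIH]
      -- now split on which pair kv is
      simp only [pvKeysC, List.mem_cons, List.not_mem_nil, or_false] at hmem
      rcases hmem with rfl | rfl | rfl | rfl | rfl | rfl | rfl
      · exact pv_chain_step [] _ _ _ r pvKeysC_OK (by intro x hx; simp at hx)
          (by intro x hx p hp
              fin_cases hx <;>
                exact pv_protectd _ _ _ r hNBl (by decide) (by decide) p hp)
      · exact pv_chain_step [("index".toList, "Index".toList)] _ _ _ r pvKeysC_OK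
          (by intro x hx p hp
              fin_cases hx <;>
                exact pv_protectd _ _ _ r hNBl (by decide) (by decide) p hp)
          (by intro x hx p hp
              fin_cases hx <;>
                exact pv_protectd _ _ _ r hNBl (by decide) (by decide) p hp)
      · exact pv_chain_step [("index".toList, "Index".toList), ("entry_id".toList, "ID".toList)]
          _ _ _ r pvKeysC_OK
          (by intro x hx p hp
              fin_cases hx <;>
                exact pv_protectd _ _ _ r hNBl (by decide) (by decide) p hp)
          (by intro x hx p hp
              fin_cases hx <;>
                exact pv_protectd _ _ _ r hNBl (by decide) (by decide) p hp)
      · exact pv_chain_step [("index".toList, "Index".toList), ("entry_id".toList, "ID".toList),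
            ("title".toList, "Title".toList)] _ _ _ r pvKeysC_OK
          (by intro x hx p hp
              fin_cases hx <;>
                exact pv_protectd _ _ _ r hNBl (by decide) (by decide) p hp)
          (by intro x hx p hp
              fin_cases hx <;>
                exact pv_protectd _ _ _ r hNBl (by decide) (by decide) p hp)
      · exact pv_chain_step [("index".toList, "Index".toList), ("entry_id".toList, "ID".toList),
            ("title".toList, "Title".toList), ("root_partition".toList, "Root Node".toList)]
          _ _ _ r pvKeysC_OK
          (by intro x hx p hp
              fin_cases hx <;>
                exact pv_protectd _ _ _ r hNBl (by decide) (by decide) p hp)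
          (by intro x hx p hp
              fin_cases hx <;>
                exact pv_protectd _ _ _ r hNBl (by decide) (by decide) p hp)
      · exact pv_chain_step [("index".toList, "Index".toList), ("entry_id".toList, "ID".toList),
            ("title".toList, "Title".toList), ("root_partition".toList, "Root Node".toList),
            ("mount_point".toList, "Mount Point".toList)] _ _ _ r pvKeysC_OK
          (by intro x hx p hp
              fin_cases hx <;>
                exact pv_protectd _ _ _ r hNBl (by decide) (by decide) p hp)
          (by intro x hx p hp
              fin_cases hx <;>
                exact pv_protectd _ _ _ r hNBl (by decide) (by decide) p hp)
      · exact pv_chain_step [("index".toList, "Index".toList), ("entry_id".toList, "ID".toList),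
            ("title".toList, "Title".toList), ("root_partition".toList, "Root Node".toList),
            ("mount_point".toList, "Mount Point".toList), ("exec_path".toList, "Loader".toList)]
          [] _ _ r pvKeysC_OK
          (by intro x hx p hp
              fin_cases hx <;>
                exact pv_protectd _ _ _ r hNBl (by decide) (by decide) p hp)
          (by intro x hx; simp at hx)

-- B port equals the clean pass
theorem pv_scanGo_eq : ∀ fuel (data : List Char) i out, data.length - i ≤ fuel →
    pvScanGo data fuel i out = out.flatten ++ pvScanF fuel (data.drop i) := by
  intro fuel
  induction fuel with
  | zero =>
    intro data i out hle
    have hge : data.length ≤ i := by omega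
    rw [pvScanGo]
    cases hdrop : data.drop i with
    | nil => simp [pvScanF]
    | cons c t =>
      exfalso
      have := congrArg List.length hdrop
      simp [List.length_drop] at this; omega
  | succ fuel ih =>
    intro data i out hle
    rw [pvScanGo]
    by_cases h : i < data.length
    · simp only [dif_pos h]
      have hdrop : data.drop i = data[i] :: data.drop (i + 1) := List.drop_eq_getElem_cons h
      have hpred : (fun kv : List Char × List Char => pvStartsWith data kv.1 i)
          = fun kv => kv.1.isPrefixOf (data.drop i) := rfl
      cases hf : pvKeysC.find? (fun kv => pvStartsWith data kv.1 i) with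
      | some kv =>
        show pvScanGo data fuel (i + kv.1.length) (out ++ [kv.2]) = _
        have hkne : kv.1.length ≠ 0 := by
          have hm := (pvKeysC_OK kv (List.mem_of_find?_eq_some hf)).1
          simpa [List.length_eq_zero_iff] using hm
        rw [ih data (i + kv.1.length) (out ++ [kv.2]) (by omega)]
        have hf' : pvKeysC.find? (fun kv => kv.1.isPrefixOf (data[i] :: data.drop (i + 1)))
            = some kv := by rw [← hdrop, ← hpred]; exact hf
        have hdd : (data.drop i).drop kv.1.length = data.drop (i + kv.1.length) := by
          simp [List.drop_drop, Nat.add_comm]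
        rw [hdrop]
        simp only [pvScanF, hf']
        rw [← hdrop, hdd]
        simp
      | none =>
        show pvScanGo data fuel (i + 1) (out ++ [[data[i]]]) = _
        rw [ih data (i + 1) (out ++ [[data[i]]]) (by omega)]
        have hf' : pvKeysC.find? (fun kv => kv.1.isPrefixOf (data[i] :: data.drop (i + 1)))
            = none := by rw [← hdrop, ← hpred]; exact hf
        rw [hdrop]
        simp only [pvScanF, hf']
        simp
    · simp only [dif_neg h]
      rw [List.drop_of_length_le (by omega)]
      cases fuel <;> simp [pvScanF]

theorem pv_alt_toList (data : String) :
    (replace_dict_keys_alt data).toList = pvScanF data.toList.length data.toList := by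
  rw [replace_dict_keys_alt, String.toList_ofList,
    pv_scanGo_eq data.toList.length data.toList 0 [] (by omega)]
  simp

theorem pv_A_toList (data : String) :
    (replace_dict_keys data).toList = pvChain pvKeysC data.toList := by
  rw [show replace_dict_keys data
      = PySem.Str.replace (PySem.Str.replace (PySem.Str.replace (PySem.Str.replace
          (PySem.Str.replace (PySem.Str.replace (PySem.Str.replace data
          "index" "Index") "entry_id" "ID") "title" "Title") "root_partition" "Root Node")
          "mount_point" "Mount Point") "exec_path" "Loader") "options" "Kernel Options" from rfl]
  rw [pv_replace_eq_Rep _ _ _ (by decide), pv_replace_eq_Rep _ _ _ (by decide),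
    pv_replace_eq_Rep _ _ _ (by decide), pv_replace_eq_Rep _ _ _ (by decide),
    pv_replace_eq_Rep _ _ _ (by decide), pv_replace_eq_Rep _ _ _ (by decide),
    pv_replace_eq_Rep _ _ _ (by decide)]
  simp only [String.toList_ofList]
  rfl

-- ===== VERDICT (by name: the statement is the Claim_ definition above) =====
theorem replace_dict_keys_spec : Claim_equal_replace_dict_keys := by
  intro data _ hPre
  unfold Spec_replace_dict_keys
  apply String.toList_inj.mp
  rw [pv_A_toList, pv_alt_toList]
  apply pv_main data.toList.length data.toList le_rfl
  intro b hb
  simp only [pvBadC, List.mem_map] at hb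
  obtain ⟨x, hx, rfl⟩ := hb
  exact hPre x hx
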